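-- pv_equiv track=rewrite | github.com/SiddhiRavindra/historical-divergence-analyzer | src/part1_data_acquisition/parsers/text_parser.py | extract_title_heuristic
-- ===== SOURCE A (Python) =====
-- from typing import Dict, Optional, List, Tuple
--
-- def extract_title_heuristic(text: str) -> Optional[str]:
--
--     lines = text.split('\n')[:50]  # Look at first 50 lines
--
--     # Look for lines that might be titles
--     potential_titles = []
--
--     for i, line in enumerate(lines):
--         line = line.strip()
--
--         # Skip empty lines and very short lines
--         if not line or len(line) < 3:
--             continue
--
--         # Skip lines that look like metadata
--         if any(pattern in line.lower() for pattern in ['project gutenberg', 'release date', 'produced by', 'language:']):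
--             continue
--
--         # Lines in ALL CAPS might be titles
--         if line.isupper() and 5 <= len(line) <= 100:
--             potential_titles.append((line, 'caps'))
--
--         # Lines that are longer than surrounding lines might be titles
--         if 10 <= len(line) <= 100 and not line.endswith('.'):
--             potential_titles.append((line, 'length'))
--
--     # Return the most likely title
--     if potential_titles:
--         # Prefer ALL CAPS titles first
--         caps_titles = [t for t in potential_titles if t[1] == 'caps']
--         if caps_titles:
--             return caps_titles[0][0].title()  # Convert to title case
--         else:
--             return potential_titles[0][0]
--
--     return None
-- ===== SOURCE B (Python) =====
-- def extract_title_heuristic(text):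
--     METADATA = ('project gutenberg', 'release date', 'produced by', 'language:')
--
--     def choose(lines):
--         # Recursive short-circuit combine, built back-to-front: a caps candidate
--         # at the head wins outright (recursion stops); a length candidate at the
--         # head is kept unless a caps candidate appears somewhere later.
--         if not lines:
--             return None
--         line = lines[0].strip()
--         if len(line) >= 3 and not any(p in line.lower() for p in METADATA):
--             if line.isupper() and 5 <= len(line) <= 100:
--                 return (True, line)
--             rest = choose(lines[1:])
--             if 10 <= len(line) <= 100 and not line.endswith('.'):
--                 if rest is None or not rest[0]:
--                     return (False, line)
--             return rest
--         return choose(lines[1:])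
--
--     best = choose(text.split('\n')[:50])
--     if best is None:
--         return None
--     return best[1].title() if best[0] else best[1]
-- ===== Notes on version B (the rewrite author's own statement) =====
-- stated objective: alternative
-- what changed: Replaces A's accumulate-all-(candidate,kind)-pairs-then-post-filter loop with a short-circuiting structural recursion over the lines that stops at the first ALL-CAPS candidate and otherwise combines the head with the recursive result back-to-front, so no candidate list is ever built.
import Mathlib
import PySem

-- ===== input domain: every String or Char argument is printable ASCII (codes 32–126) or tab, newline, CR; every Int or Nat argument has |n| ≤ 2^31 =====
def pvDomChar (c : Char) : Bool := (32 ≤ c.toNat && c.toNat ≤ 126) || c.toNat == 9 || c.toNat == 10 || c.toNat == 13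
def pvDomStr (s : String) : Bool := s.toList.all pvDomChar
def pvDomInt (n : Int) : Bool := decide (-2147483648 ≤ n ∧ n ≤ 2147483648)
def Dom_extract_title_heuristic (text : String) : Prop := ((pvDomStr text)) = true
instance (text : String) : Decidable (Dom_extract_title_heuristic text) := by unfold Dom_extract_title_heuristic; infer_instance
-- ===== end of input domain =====

-- B is an alternative decomposition of A: instead of accumulating a tagged candidate list
-- and post-filtering it, B is a short-circuiting structural recursion over the lines that
-- stops at the first ALL-CAPS candidate and combines results back-to-front.

-- shared exact ports of Python str primitives (ASCII domain: a cased character is a letter)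
-- str.isupper(): at least one cased char and no lowercase cased char
def pvIsUpperStr (s : String) : Bool :=
  s.toList.any PySem.Chars.isalpha && s.toList.all (fun c => !PySem.Chars.islower c)

-- str.title(): a letter after a non-letter is uppercased, other letters lowercased
def pvTitleGo : Bool → List Char → List Char
  | _, [] => []
  | prev, c :: rest =>
    (if PySem.Chars.isalpha c then (if prev then PySem.Chars.lowerChar c else PySem.Chars.upperChar c) else c)
      :: pvTitleGo (PySem.Chars.isalpha c) rest

def pvTitleStr (s : String) : String := String.ofList (pvTitleGo false s.toList)

-- any(pattern in line.lower() for pattern in [...])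
def pvMetaB (s : String) : Bool :=
  PySem.Str.isIn "project gutenberg" (PySem.Str.lower s) ||
  PySem.Str.isIn "release date" (PySem.Str.lower s) ||
  PySem.Str.isIn "produced by" (PySem.Str.lower s) ||
  PySem.Str.isIn "language:" (PySem.Str.lower s)

-- line.isupper() and 5 <= len(line) <= 100
def pvCapsB (s : String) : Bool :=
  pvIsUpperStr s && decide (5 ≤ PySem.Str.len s) && decide (PySem.Str.len s ≤ 100)

-- 10 <= len(line) <= 100 and not line.endswith('.')
def pvLenB (s : String) : Bool :=
  decide (10 ≤ PySem.Str.len s) && decide (PySem.Str.len s ≤ 100) && !PySem.Str.endswith s "."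

-- text.split('\n')[:50]
def pvLines (text : String) : List String :=
  PySem.List.slice ((PySem.Str.split? text "\n").getD []) none (some 50)

-- ===== PORT A =====
-- one iteration of A's loop over `lines` (accumulator = potential_titles)
def pvBodyA (acc : List (String × String)) (raw : String) : List (String × String) :=
  let line := PySem.Str.strip raw
  if line == "" || PySem.Str.len line < 3 then acc
  else if pvMetaB line then acc
  else
    let acc := if pvCapsB line then acc ++ [(line, "caps")] else acc
    if pvLenB line then acc ++ [(line, "length")] else acc

def extract_title_heuristic (text : String) : Option String :=
  let potential := (pvLines text).foldl pvBodyA []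
  match potential with
  | [] => none
  | p :: _ =>
    match potential.filter (fun t => t.2 == "caps") with
    | c :: _ => some (pvTitleStr c.1)
    | [] => some p.1

-- ===== PORT B =====
-- len(line) >= 3 and not any(p in line.lower() for p in METADATA)
def pvKeep (s : String) : Bool := decide (3 ≤ PySem.Str.len s) && !pvMetaB s

-- B's `choose`: (True, line) = caps candidate, (False, line) = length candidate
def pvChoose : List String → Option (Bool × String)
  | [] => none
  | raw :: rest =>
    let line := PySem.Str.strip raw
    if pvKeep line then
      if pvCapsB line then some (true, line)
      else
        let r := pvChoose rest
        if pvLenB line then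
          match r with
          | some (true, _) => r
          | _ => some (false, line)
        else r
    else pvChoose rest

def extract_title_heuristic_alt (text : String) : Option String :=
  match pvChoose (pvLines text) with
  | none => none
  | some (true, l) => some (pvTitleStr l)
  | some (false, l) => some l

-- ===== PRECONDITION & SPEC =====
def Spec_extract_title_heuristic (text : String) (out : Option String) : Prop := out = extract_title_heuristic_alt text
instance (text : String) (out : Option String) : Decidable (Spec_extract_title_heuristic text out) := by unfold Spec_extract_title_heuristic; infer_instance

-- ===== CLAIM (what is proved, stated in full; the proofs are below) =====
def Claim_equal_extract_title_heuristic : Prop := ∀ (text : String), Dom_extract_title_heuristic text → Spec_extract_title_heuristic text (extract_title_heuristic text)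

-- ===== LEMMAS AND PROOFS =====

-- the stripped lines surviving the skip tests (proof-side characterisation)
def pvCleanB (lines : List String) : List String :=
  lines.filterMap (fun raw =>
    let line := PySem.Str.strip raw
    if pvKeep line then some line else none)

-- contribution of one (already stripped) line to potential_titles
def pvGs (s : String) : List (String × String) :=
  if pvKeep s then
    (if pvCapsB s then [(s, "caps")] else []) ++ (if pvLenB s then [(s, "length")] else [])
  else []

theorem pvStrip_ne_empty (raw : String) (h : (3:Int) ≤ ((PySem.Chars.strip raw.toList).length : Int)) :
    (PySem.Str.strip raw == "") = false := by
  rw [beq_eq_false_iff_ne]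
  intro hc
  have h0 : (PySem.Chars.strip raw.toList).length = 0 := by
    simpa using congrArg List.length (congrArg String.toList hc)
  omega

theorem pvBodyA_eq (acc : List (String × String)) (raw : String) :
    pvBodyA acc raw = acc ++ pvGs (PySem.Str.strip raw) := by
  unfold pvBodyA pvGs pvKeep
  dsimp only
  by_cases h3 : (3:Int) ≤ ((PySem.Chars.strip raw.toList).length : Int)
  · have hne := pvStrip_ne_empty raw h3
    have hlt : ¬ ((PySem.Chars.strip raw.toList).length : Int) < 3 := by omega
    by_cases hm : pvMetaB (PySem.Str.strip raw) = true
    · simp [hne, hlt, h3, hm]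
    · simp only [Bool.not_eq_true] at hm
      simp only [PySem.Str.len_eq, PySem.Str.toList_strip, hne, hm, h3, hlt, decide_true,
        decide_false, Bool.false_or, Bool.false_eq_true, if_false, Bool.not_false, Bool.and_true, if_true]
      split_ifs <;> simp
  · have hlt : ((PySem.Chars.strip raw.toList).length : Int) < 3 := by omega
    simp [hlt, h3]

theorem pvFoldA_eq (ls : List String) (acc : List (String × String)) :
    ls.foldl pvBodyA acc = acc ++ ls.flatMap (fun raw => pvGs (PySem.Str.strip raw)) := by
  induction ls generalizing acc with
  | nil => simp
  | cons l ls ih => simp [List.foldl_cons, pvBodyA_eq, ih]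

theorem pvClean_cons (l : String) (ls : List String) :
    pvCleanB (l :: ls)
      = (if pvKeep (PySem.Str.strip l) then [PySem.Str.strip l] else []) ++ pvCleanB ls := by
  unfold pvCleanB
  dsimp only [List.filterMap_cons]
  by_cases hk : pvKeep (PySem.Str.strip l) = true <;> simp [hk]

-- B's recursion computes: first caps candidate, else first length candidate
theorem pvChoose_eq (ls : List String) :
    pvChoose ls =
      match (pvCleanB ls).find? pvCapsB with
      | some c => some (true, c)
      | none => ((pvCleanB ls).find? pvLenB).map (fun l => (false, l)) := by
  induction ls with
  | nil => simp [pvChoose, pvCleanB]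
  | cons l ls ih =>
    rw [pvChoose, pvClean_cons]
    generalize PySem.Str.strip l = s
    by_cases hk : pvKeep s = true
    · by_cases hc : pvCapsB s = true
      · simp [hk, hc]
      · have hfc : List.find? pvCapsB ((if pvKeep s = true then [s] else []) ++ pvCleanB ls)
            = List.find? pvCapsB (pvCleanB ls) := by simp [hk, hc]
        rw [hfc]
        by_cases hl : pvLenB s = true
        · cases hcap : (pvCleanB ls).find? pvCapsB with
          | some c =>
            have : pvChoose ls = some (true, c) := by rw [ih, hcap]
            simp [hk, hc, hl, this]
          | none =>
            have hch : pvChoose ls = ((pvCleanB ls).find? pvLenB).map (fun l => (false, l)) := by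
              rw [ih, hcap]
            have hfl : List.find? pvLenB ((if pvKeep s = true then [s] else []) ++ pvCleanB ls)
                = some s := by simp [hk, hl]
            rw [hfl]
            simp only [hk, if_true, hc, Bool.false_eq_true, if_false, hl]
            rw [hch]
            cases hrest : (pvCleanB ls).find? pvLenB <;> simp
        · have hfl : List.find? pvLenB ((if pvKeep s = true then [s] else []) ++ pvCleanB ls)
              = List.find? pvLenB (pvCleanB ls) := by simp [hk, hl]
          rw [hfl]
          simp only [hk, if_true, hc, Bool.false_eq_true, if_false, hl]
          exact ih
    · have h1 : List.find? pvCapsB ((if pvKeep s = true then [s] else []) ++ pvCleanB ls)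
          = List.find? pvCapsB (pvCleanB ls) := by simp [hk]
      have h2 : List.find? pvLenB ((if pvKeep s = true then [s] else []) ++ pvCleanB ls)
          = List.find? pvLenB (pvCleanB ls) := by simp [hk]
      rw [h1, h2]
      simp only [hk, Bool.false_eq_true, if_false]
      exact ih

theorem pvCaps_head (ls : List String) :
    (((ls.flatMap (fun raw => pvGs (PySem.Str.strip raw))).filter (fun t => t.2 == "caps")).head?).map (·.1)
      = (pvCleanB ls).find? pvCapsB := by
  induction ls with
  | nil => simp [pvCleanB]
  | cons l ls ih =>
    rw [List.flatMap_cons, List.filter_append, pvClean_cons]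
    generalize PySem.Str.strip l = s
    by_cases hk : pvKeep s = true
    · by_cases hc : pvCapsB s = true
      · have hg : pvGs s = (s, "caps") :: (if pvLenB s = true then [(s, "length")] else []) := by
          unfold pvGs; simp [hk, hc]
        rw [hg]
        simp [hk, hc]
      · have hg : pvGs s = if pvLenB s = true then [(s, "length")] else [] := by
          unfold pvGs; simp [hk, hc]
        have hrhs : List.find? pvCapsB ((if pvKeep s = true then [s] else []) ++ pvCleanB ls)
            = List.find? pvCapsB (pvCleanB ls) := by
          simp [hk, show pvCapsB s = false by simpa using hc]
        rw [hg, hrhs, ← ih]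
        by_cases hl : pvLenB s = true <;> simp [hl]
    · have hg : pvGs s = [] := by unfold pvGs; simp [hk]
      have hrhs : List.find? pvCapsB ((if pvKeep s = true then [s] else []) ++ pvCleanB ls)
          = List.find? pvCapsB (pvCleanB ls) := by simp [hk]
      rw [hg, hrhs, ← ih]
      simp

theorem pvLen_head (ls : List String)
    (h : ((ls.flatMap (fun raw => pvGs (PySem.Str.strip raw))).filter (fun t => t.2 == "caps")) = []) :
    ((ls.flatMap (fun raw => pvGs (PySem.Str.strip raw))).head?).map (·.1)
      = (pvCleanB ls).find? pvLenB := by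
  induction ls with
  | nil => simp [pvCleanB]
  | cons l ls ih =>
    rw [List.flatMap_cons, List.filter_append, List.append_eq_nil_iff] at h
    obtain ⟨h1, h2⟩ := h
    rw [List.flatMap_cons, pvClean_cons]
    revert h1
    generalize PySem.Str.strip l = s
    intro h1
    by_cases hk : pvKeep s = true
    · by_cases hc : pvCapsB s = true
      · exfalso
        have hg : pvGs s = (s, "caps") :: (if pvLenB s = true then [(s, "length")] else []) := by
          unfold pvGs; simp [hk, hc]
        rw [hg] at h1
        simp at h1
      · have hg : pvGs s = if pvLenB s = true then [(s, "length")] else [] := by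
          unfold pvGs; simp [hk, hc]
        by_cases hl : pvLenB s = true
        · rw [hg]
          simp [hk, hl]
        · have hrhs : List.find? pvLenB ((if pvKeep s = true then [s] else []) ++ pvCleanB ls)
              = List.find? pvLenB (pvCleanB ls) := by
            simp [hk, show pvLenB s = false by simpa using hl]
          rw [hg, hrhs, ← ih h2]
          simp [hl]
    · have hg : pvGs s = [] := by unfold pvGs; simp [hk]
      have hrhs : List.find? pvLenB ((if pvKeep s = true then [s] else []) ++ pvCleanB ls)
          = List.find? pvLenB (pvCleanB ls) := by simp [hk]
      rw [hg, hrhs, ← ih h2]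
      simp

-- B's result in find?-form
theorem pvAlt_eq (text : String) :
    extract_title_heuristic_alt text =
      match (pvCleanB (pvLines text)).find? pvCapsB with
      | some c => some (pvTitleStr c)
      | none => (pvCleanB (pvLines text)).find? pvLenB := by
  unfold extract_title_heuristic_alt
  rw [pvChoose_eq]
  cases hcap : (pvCleanB (pvLines text)).find? pvCapsB with
  | some c => simp
  | none =>
    cases hlen : (pvCleanB (pvLines text)).find? pvLenB with
    | some r => simp
    | none => simp

-- ===== VERDICT (by name: the statement is the Claim_ definition above) =====
theorem extract_title_heuristic_spec : Claim_equal_extract_title_heuristic := by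
  intro text _
  unfold Spec_extract_title_heuristic extract_title_heuristic
  dsimp only
  rw [pvFoldA_eq, List.nil_append, pvAlt_eq]
  have hcaps := pvCaps_head (pvLines text)
  have := pvLen_head (pvLines text)
  cases hpot : (pvLines text).flatMap (fun raw => pvGs (PySem.Str.strip raw)) with
  | nil =>
    rw [hpot] at hcaps this
    simp only [List.filter_nil, List.head?_nil, Option.map_none] at hcaps
    have hlen := this (by simp)
    simp only [List.head?_nil, Option.map_none] at hlen
    simp [← hcaps, ← hlen]
  | cons p rest =>
    rw [hpot] at hcaps this
    cases hf : ((p :: rest).filter (fun t => t.2 == "caps")) with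
    | cons c cs =>
      rw [hf] at hcaps
      simp only [List.head?_cons, Option.map_some] at hcaps
      simp [← hcaps]
    | nil =>
      rw [hf] at hcaps
      simp only [List.head?_nil, Option.map_none] at hcaps
      have hlen := this hf
      simp only [List.head?_cons, Option.map_some] at hlen
      simp [← hcaps, ← hlen]
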